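-- pv_equiv track=rewrite | github.com/isudox/nerd-algo | python-algorithm/leetcode/problem_1807.py | evaluate
-- ===== SOURCE A (Python) =====
-- from typing import List
--
-- def evaluate(s: str, knowledge: List[List[str]]) -> str:
--     store = {}
--     for a, b in knowledge:
--         store[a] = b
--     ans = ''
--     i = 0
--     for j in range(len(s)):
--         if s[j] == '(':
--             ans += s[i:j]
--             i = j + 1
--         elif s[j] == ')':
--             cur = s[i:j]
--             ans += store[cur] if cur in store else '?'
--             i = j + 1
--         elif j == len(s) - 1:
--             ans += s[i:]
--     return ans
-- ===== SOURCE B (Python) =====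
-- from typing import List
--
-- def evaluate(s: str, knowledge: List[List[str]]) -> str:
--     store = dict(knowledge)
--     pieces = []
--     for chunk in s.split('('):
--         *keys, literal = chunk.split(')')
--         pieces.extend(store.get(k, '?') for k in keys)
--         pieces.append(literal)
--     return ''.join(pieces)
-- ===== Notes on version B (the rewrite author's own statement) =====
-- stated objective: idiomatic
-- what changed: A's manual index-pointer scan with slice bookkeeping and a last-index special case is replaced by tokenizing with s.split('(') and per-chunk split(')'), looking keys up in dict(knowledge) and joining all pieces once.
import Mathlib
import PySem

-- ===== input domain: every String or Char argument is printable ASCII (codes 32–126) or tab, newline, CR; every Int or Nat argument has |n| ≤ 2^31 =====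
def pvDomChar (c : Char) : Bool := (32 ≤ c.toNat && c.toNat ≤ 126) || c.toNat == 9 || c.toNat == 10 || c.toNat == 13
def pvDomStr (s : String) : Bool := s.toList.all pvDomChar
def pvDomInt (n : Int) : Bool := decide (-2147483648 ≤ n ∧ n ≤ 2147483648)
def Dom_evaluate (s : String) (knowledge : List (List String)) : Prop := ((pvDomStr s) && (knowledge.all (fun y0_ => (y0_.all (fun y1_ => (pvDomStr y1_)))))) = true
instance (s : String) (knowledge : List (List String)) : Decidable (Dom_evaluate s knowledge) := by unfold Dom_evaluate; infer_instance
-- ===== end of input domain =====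

-- B replaces A's index-pointer scan with slicing by a split('(') / split(')') tokenization joined once (idiomatic; same return value).

-- ===== PORT A =====
-- store = {}; for a, b in knowledge: store[a] = b   (a row of length ≠ 2 raises ValueError in Python; such inputs are excluded by Pre_, so the catch-all arm is never reached there)
def pvStoreA (knowledge : List (List String)) : PySem.Dict (List Char) (List Char) :=
  knowledge.foldl (fun st row =>
    match row with
    | [a, b] => st.insert a.toList b.toList
    | _ => st) PySem.Dict.empty

-- the body of A's `for j in range(len(s))` loop over the state (ans, i); s[j] is ported with pyGetD,
-- exact here since j is always in range; `store[cur] if cur in store else '?'` is the contains-guarded lookup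
def pvStepA (store : PySem.Dict (List Char) (List Char)) (cs : List Char)
    (st : List Char × Int) (j : Int) : List Char × Int :=
  if PySem.List.pyGetD cs j ' ' = '(' then
    (st.1 ++ PySem.List.slice cs (some st.2) (some j), j + 1)
  else if PySem.List.pyGetD cs j ' ' = ')' then
    (st.1 ++ (if store.contains (PySem.List.slice cs (some st.2) (some j)) then
                store.getD (PySem.List.slice cs (some st.2) (some j)) ['?'] else ['?']), j + 1)
  else if j = (cs.length : Int) - 1 then
    (st.1 ++ PySem.List.slice cs (some st.2) none, st.2)
  else st

def evaluate (s : String) (knowledge : List (List String)) : String :=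
  String.ofList (((PySem.List.pyRange 0 (s.toList.length : Int) 1).foldl
    (pvStepA (pvStoreA knowledge) s.toList) ([], 0)).1)

-- ===== PORT B =====
-- store = dict(knowledge)  (same pair unpacking as A's loop; a row of length ≠ 2 raises, excluded by Pre_)
def pvStoreB (knowledge : List (List String)) : PySem.Dict (List Char) (List Char) :=
  knowledge.foldl (fun st row =>
    match row with
    | [a, b] => st.insert a.toList b.toList
    | _ => st) PySem.Dict.empty

-- for chunk in s.split('('): *keys, literal = chunk.split(')'); pieces += lookups; pieces.append(literal); return ''.join(pieces)
def evaluate_alt (s : String) (knowledge : List (List String)) : String :=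
  let store := pvStoreB knowledge
  String.ofList (PySem.Chars.join []
    ((PySem.Chars.splitOn s.toList ['(']).foldl (fun acc chunk =>
      acc ++ ((PySem.Chars.splitOn chunk [')']).dropLast.map (fun k => store.getD k ['?'])
        ++ [(PySem.Chars.splitOn chunk [')']).getLastD []])) []))

-- ===== PRECONDITION & SPEC =====
-- Pre_ excludes exactly the inputs where Python A raises: a row of knowledge whose length is not 2 makes `for a, b in knowledge` raise ValueError.
def Pre_evaluate (s : String) (knowledge : List (List String)) : Prop :=
  ∀ row ∈ knowledge, row.length = 2
instance (s : String) (knowledge : List (List String)) : Decidable (Pre_evaluate s knowledge) := by unfold Pre_evaluate; infer_instance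
def pvWitness_evaluate : String × List (List String) := ("(name)is(age)yearsold", [["name", "bob"], ["age", "two"]])

def Spec_evaluate (s : String) (knowledge : List (List String)) (out : String) : Prop := out = evaluate_alt s knowledge
instance (s : String) (knowledge : List (List String)) (out : String) : Decidable (Spec_evaluate s knowledge out) := by unfold Spec_evaluate; infer_instance

-- ===== CLAIM (what is proved, stated in full; the proofs are below) =====
def Claim_equal_evaluate : Prop := ∀ (s : String) (knowledge : List (List String)), Dom_evaluate s knowledge → Pre_evaluate s knowledge → Spec_evaluate s knowledge (evaluate s knowledge)

-- ===== LEMMAS AND PROOFS =====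

-- reference scan both ports are reduced to: pend is the text read since the last delimiter
def pvRef (store : PySem.Dict (List Char) (List Char)) : List Char → List Char → List Char
  | pend, [] => pend
  | pend, c :: r =>
    if c = '(' then pend ++ pvRef store [] r
    else if c = ')' then store.getD pend ['?'] ++ pvRef store [] r
    else pvRef store (pend ++ [c]) r

-- fuel-free single-character split (what Chars.splitOn computes for a one-char separator)
def pvSplit (d : Char) (pre : List Char) : List Char → List (List Char)
  | [] => [pre]
  | c :: r => if c = d then pre :: pvSplit d [] r else pvSplit d (pre ++ [c]) r

lemma pvGetD_if {store : PySem.Dict (List Char) (List Char)} (k : List Char) :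
    (if store.contains k then store.getD k ['?'] else ['?']) = store.getD k ['?'] := by
  by_cases h : store.contains k = true
  · simp [h]
  · simp only [Bool.not_eq_true] at h
    simp [h, PySem.Dict.getD_of_not_contains _ _ h]

lemma pvStores_eq (knowledge : List (List String)) : pvStoreB knowledge = pvStoreA knowledge := rfl

-- ---- A side: the index loop is pvRef ----

lemma pvA_loop (store : PySem.Dict (List Char) (List Char)) (cs : List Char) :
    ∀ (n j i : Nat) (ans : List Char), i ≤ j → j ≤ cs.length → cs.length - j = n →
      (j = cs.length → i = j) →
      ((PySem.List.pyRange (j : Int) (cs.length : Int) 1).foldl (pvStepA store cs) (ans, (i : Int))).1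
        = ans ++ pvRef store ((cs.drop i).take (j - i)) (cs.drop j) := by
  intro n
  induction n with
  | zero =>
    intro j i ans hij hj hn hlast
    have hjl : j = cs.length := by omega
    have hi : i = j := hlast hjl
    subst hi
    rw [show ((cs.length : Int)) = ((i : Int)) by exact_mod_cast hjl.symm]
    simp [PySem.List.pyRange, pvRef, hjl]
  | succ n ih =>
    intro j i ans hij hj hn hlast
    have hjlt : j < cs.length := by omega
    have hcast : ((j : Int)) < ((cs.length : Int)) := by exact_mod_cast hjlt
    rw [PySem.List.pyRange_one_cons hcast, List.foldl_cons]
    have hdrop : cs.drop j = cs[j] :: cs.drop (j + 1) := List.drop_eq_getElem_cons hjlt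
    have hget : PySem.List.pyGetD cs (j : Int) ' ' = cs[j] := by
      rw [PySem.List.pyGetD_eq_getElem cs ' ' (by positivity) (by exact_mod_cast hjlt)]
      simp
    have hsucc : ((j : Int)) + 1 = (((j + 1 : Nat)) : Int) := by push_cast; ring
    by_cases h1 : cs[j] = '('
    · have hstep : pvStepA store cs (ans, (i : Int)) (j : Int)
          = (ans ++ (cs.drop i).take (j - i), ((j : Int)) + 1) := by
        simp [pvStepA, hget, h1, PySem.List.slice_natCast]
      rw [hstep, hsucc,
        ih (j + 1) (j + 1) _ (le_refl _) (by omega) (by omega) (fun _ => rfl)]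
      rw [hdrop]
      simp [pvRef, h1]
    · by_cases h2 : cs[j] = ')'
      · have hstep : pvStepA store cs (ans, (i : Int)) (j : Int)
            = (ans ++ store.getD ((cs.drop i).take (j - i)) ['?'], ((j : Int)) + 1) := by
          simp only [pvStepA, hget, h2, PySem.List.slice_natCast, pvGetD_if]
          simp
        rw [hstep, hsucc,
          ih (j + 1) (j + 1) _ (le_refl _) (by omega) (by omega) (fun _ => rfl)]
        rw [hdrop]
        simp [pvRef, h2]
      · by_cases h3 : j = cs.length - 1
        · -- last index, ordinary character: the tail is flushed
          have hstep : pvStepA store cs (ans, (i : Int)) (j : Int)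
              = (ans ++ cs.drop i, (i : Int)) := by
            simp only [pvStepA, hget, h1, h2, if_false]
            rw [if_pos (by omega), PySem.List.slice_from_natCast]
          rw [hstep]
          rw [show ((j : Int)) + 1 = ((cs.length : Int)) by omega]
          simp only [PySem.List.pyRange]
          rw [hdrop]
          have hjl : j + 1 = cs.length := by omega
          rw [show cs.drop (j + 1) = [] by rw [hjl]; exact List.drop_length]
          have hpend : (cs.drop i).take (j - i) ++ [cs[j]] = cs.drop i := by
            have h4 : (cs.drop i).take ((j - i) + 1) = (cs.drop i).take (j - i) ++ [cs[j]] := by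
              rw [List.take_add_one]
              congr 1
              rw [List.getElem?_drop]
              rw [show i + (j - i) = j by omega]
              simp [List.getElem?_eq_getElem hjlt]
            rw [← h4]
            apply List.take_of_length_le
            simp
            omega
          simp [pvRef, h1, h2, hpend]
        · -- interior ordinary character
          have hstep : pvStepA store cs (ans, (i : Int)) (j : Int) = (ans, (i : Int)) := by
            simp only [pvStepA, hget, h1, h2, if_false]
            rw [if_neg (by omega)]
          rw [hstep, hsucc,
            ih (j + 1) i ans (by omega) (by omega) (by omega) (by omega)]
          rw [hdrop]
          have h4 : (cs.drop i).take ((j + 1) - i) = (cs.drop i).take (j - i) ++ [cs[j]] := by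
            rw [show (j + 1) - i = (j - i) + 1 by omega, List.take_add_one]
            congr 1
            rw [List.getElem?_drop]
            rw [show i + (j - i) = j by omega]
            simp [List.getElem?_eq_getElem hjlt]
          rw [h4]
          simp [pvRef, h1, h2]

lemma pvA_eq (s : String) (knowledge : List (List String)) :
    evaluate s knowledge = String.ofList (pvRef (pvStoreA knowledge) [] s.toList) := by
  unfold evaluate
  have h := pvA_loop (pvStoreA knowledge) s.toList s.toList.length 0 0 []
    (le_refl 0) (Nat.zero_le _) (by omega) (fun h => rfl)
  simp only [Nat.cast_zero, List.drop_zero, List.take_zero, Nat.sub_zero, List.nil_append] at h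
  rw [h]

-- ---- B side: the split pipeline is pvRef ----

lemma pvGo (d : Char) : ∀ (fuel : Nat) (l cur : List Char) (acc2 : List (List Char)),
    l.length < fuel →
    PySem.Chars.splitOn.go [d] fuel l cur acc2 = acc2.reverse ++ pvSplit d cur.reverse l := by
  intro fuel
  induction fuel with
  | zero => intro l cur acc2 h; omega
  | succ fuel ih =>
    intro l cur acc2 h
    cases l with
    | nil =>
      rw [PySem.Chars.splitOn.go]
      · simp [pvSplit]
      · omega
    | cons c rest =>
      rw [PySem.Chars.splitOn.go]
      by_cases hc : c = d
      · subst hc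
        have hpre : ([c].isPrefixOf (c :: rest)) = true := by simp [List.isPrefixOf]
        rw [if_pos hpre]
        simp only [List.length_singleton, List.drop_one, List.tail_cons]
        rw [ih rest [] (cur.reverse :: acc2) (by simp at h; omega)]
        simp [pvSplit]
      · have : ([d].isPrefixOf (c :: rest)) = false := by
          simp [List.isPrefixOf]; exact fun h' => absurd h'.symm hc
        rw [if_neg (by simp [this])]
        rw [ih rest (c :: cur) acc2 (by simp at h ⊢; omega)]
        simp [pvSplit, hc]

lemma pvSplitOn_eq (cs : List Char) (d : Char) :
    PySem.Chars.splitOn cs [d] = pvSplit d [] cs := by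
  unfold PySem.Chars.splitOn
  rw [pvGo d (cs.length + 1) cs [] [] (by omega)]
  simp

lemma pvSplit_ne_nil (d : Char) (pre cs : List Char) : pvSplit d pre cs ≠ [] := by
  induction cs generalizing pre with
  | nil => simp [pvSplit]
  | cons c r ih => by_cases h : c = d <;> simp [pvSplit, h, ih]

lemma pvSplit_acc (d : Char) (cs : List Char) : ∀ pre : List Char,
    pvSplit d pre cs = (pvSplit d [] cs).modifyHead (pre ++ ·) := by
  induction cs with
  | nil => intro pre; simp [pvSplit]
  | cons c r ih =>
    intro pre
    by_cases h : c = d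
    · simp [pvSplit, h]
    · simp only [pvSplit, h, if_false, List.nil_append]
      rw [ih (pre ++ [c]), ih [c]]
      cases hS : pvSplit d [] r with
      | nil => simp
      | cons a t => simp [List.append_assoc]

lemma pvSplit_no_sep (d : Char) : ∀ (a : List Char), d ∉ a →
    ∀ (pre rest : List Char), pvSplit d pre (a ++ rest) = pvSplit d (pre ++ a) rest := by
  intro a
  induction a with
  | nil => intro _ pre rest; simp
  | cons c t ih =>
    intro ha pre rest
    have hc : c ≠ d := by
      intro h; exact ha (by simp [h])
    have ht : d ∉ t := fun h => ha (by simp [h])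
    simp only [List.cons_append, pvSplit, hc, if_false]
    rw [ih ht (pre ++ [c]) rest]
    simp

lemma pvSplit_single (d : Char) (a : List Char) (ha : d ∉ a) (pre : List Char) :
    pvSplit d pre a = [pre ++ a] := by
  have := pvSplit_no_sep d a ha pre []
  simp only [List.append_nil] at this
  rw [this]; simp [pvSplit]

-- the pieces B appends for one chunk of s.split('(')
def pvChunk (store : PySem.Dict (List Char) (List Char)) (chunk : List Char) : List (List Char) :=
  (pvSplit ')' [] chunk).dropLast.map (fun k => store.getD k ['?'])
    ++ [(pvSplit ')' [] chunk).getLastD []]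

def pvOut (store : PySem.Dict (List Char) (List Char)) (chunks : List (List Char)) : List Char :=
  chunks.flatMap (fun chunk => (pvChunk store chunk).flatten)

lemma pvChunk_clean (store : PySem.Dict (List Char) (List Char)) (pend : List Char)
    (hp : ')' ∉ pend) : (pvChunk store pend).flatten = pend := by
  unfold pvChunk
  rw [pvSplit_single ')' pend hp []]
  simp

lemma pvChunk_close (store : PySem.Dict (List Char) (List Char)) (a x : List Char) (ha : ')' ∉ a) :
    pvChunk store (a ++ ')' :: x) = store.getD a ['?'] :: pvChunk store x := by
  have h1 : pvSplit ')' [] (a ++ ')' :: x) = a :: pvSplit ')' [] x := by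
    rw [pvSplit_no_sep ')' a ha [] (')' :: x)]
    simp [pvSplit]
  obtain ⟨hd, tl, hS⟩ : ∃ hd tl, pvSplit ')' [] x = hd :: tl := by
    cases hS : pvSplit ')' [] x with
    | nil => exact absurd hS (pvSplit_ne_nil _ _ _)
    | cons hd tl => exact ⟨hd, tl, rfl⟩
  unfold pvChunk
  rw [h1, hS]
  simp [List.getLastD_eq_getLast?]

lemma pvB_close (store : PySem.Dict (List Char) (List Char)) (r pend q : List Char) (hp : ')' ∉ pend) :
    pvOut store (pvSplit '(' (pend ++ ')' :: q) r)
      = store.getD pend ['?'] ++ pvOut store (pvSplit '(' q r) := by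
  obtain ⟨h0, t0, hS⟩ : ∃ h0 t0, pvSplit '(' [] r = h0 :: t0 := by
    cases hS : pvSplit '(' [] r with
    | nil => exact absurd hS (pvSplit_ne_nil _ _ _)
    | cons h0 t0 => exact ⟨h0, t0, rfl⟩
  rw [pvSplit_acc '(' r (pend ++ ')' :: q), pvSplit_acc '(' r q, hS]
  simp only [List.modifyHead]
  unfold pvOut
  simp only [List.flatMap_cons]
  have hre : (pend ++ ')' :: q) ++ h0 = pend ++ ')' :: (q ++ h0) := by simp
  rw [hre, pvChunk_close store pend (q ++ h0) hp]
  simp [List.append_assoc]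

lemma pvB_main (store : PySem.Dict (List Char) (List Char)) (cs : List Char) :
    ∀ pend : List Char, ')' ∉ pend →
      pvOut store (pvSplit '(' pend cs) = pvRef store pend cs := by
  induction cs with
  | nil =>
    intro pend hp
    simp only [pvSplit, pvOut, List.flatMap_cons, List.flatMap_nil, List.append_nil]
    rw [pvChunk_clean store pend hp]
    simp [pvRef]
  | cons c r ih =>
    intro pend hp
    by_cases h1 : c = '('
    · subst h1
      have hsp : pvSplit '(' pend ('(' :: r) = pend :: pvSplit '(' [] r := by simp [pvSplit]
      rw [hsp]
      unfold pvOut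
      simp only [List.flatMap_cons]
      rw [pvChunk_clean store pend hp]
      have := ih [] (by simp)
      unfold pvOut at this
      rw [this]
      simp [pvRef]
    · by_cases h2 : c = ')'
      · subst h2
        have : pvSplit '(' pend (')' :: r) = pvSplit '(' (pend ++ ')' :: []) r := by
          simp [pvSplit, h1]
        rw [this, pvB_close store r pend [] hp, ih [] (by simp)]
        simp [pvRef]
      · have : pvSplit '(' pend (c :: r) = pvSplit '(' (pend ++ [c]) r := by
          simp [pvSplit, h1]
        rw [this, ih (pend ++ [c]) (by simp [hp]; exact fun h => h2 h.symm)]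
        simp [pvRef, h1, h2]

lemma pvJoin_nil (parts : List (List Char)) : PySem.Chars.join [] parts = parts.flatten := by
  simp only [PySem.Chars.join, List.intercalate]
  induction parts with
  | nil => simp
  | cons p ps ih =>
    cases ps with
    | nil => simp
    | cons q t =>
      rw [List.intersperse_cons₂]
      simp only [List.flatten_cons] at ih ⊢
      rw [← ih]
      simp

lemma pvOut_eq (store : PySem.Dict (List Char) (List Char)) (chunks : List (List Char)) :
    (chunks.flatMap (pvChunk store)).flatten = pvOut store chunks := by
  unfold pvOut
  induction chunks with
  | nil => simp
  | cons c t ih => simp [List.flatMap_cons, ih]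

lemma pvB_eq (s : String) (knowledge : List (List String)) :
    evaluate_alt s knowledge = String.ofList (pvRef (pvStoreA knowledge) [] s.toList) := by
  unfold evaluate_alt
  rw [pvStores_eq]
  simp only [pvSplitOn_eq]
  rw [PySem.List.foldl_append_eq_flatMap (fun chunk =>
    (pvSplit ')' [] chunk).dropLast.map (fun k => (pvStoreA knowledge).getD k ['?'])
      ++ [(pvSplit ')' [] chunk).getLastD []])]
  have hg : (fun chunk => (pvSplit ')' [] chunk).dropLast.map (fun k => (pvStoreA knowledge).getD k ['?'])
      ++ [(pvSplit ')' [] chunk).getLastD []]) = pvChunk (pvStoreA knowledge) := rfl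
  rw [hg]
  simp only [List.nil_append]
  rw [pvJoin_nil, pvOut_eq, pvB_main (pvStoreA knowledge) s.toList [] (by simp)]

-- ===== VERDICT (by name: the statement is the Claim_ definition above) =====
theorem evaluate_spec : Claim_equal_evaluate := by
  intro s knowledge _ _
  unfold Spec_evaluate
  rw [pvA_eq, pvB_eq]
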